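-- pv_equiv track=rewrite | github.com/rainwoodman/gaepsi2 | utils/tiles.py | tilename
-- ===== SOURCE A (Python) =====
-- def tilename(i, j, imax, jmax):
--     """ i is y, j is x
--         randy:
--              0 1
--              2 3 """
--     t = 1
--     r = []
--     while t < imax or t < jmax:
--         n = 0
--         if (i & t) != 0:
--             n += 2
--         if (j & t) != 0:
--             n += 1
--         t = t * 2
--         r.append('0%s' % n)
--     return '/'.join(r[::-1])
-- ===== SOURCE B (Python) =====
-- def tilename(i, j, imax, jmax):
--     # pass 1: Morton-encode the tile path into one base-4 integer, counting levels
--     L = 0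
--     m = 0
--     t = 1
--     while t < imax or t < jmax:
--         m += (2 * ((i & t) != 0) + ((j & t) != 0)) * 4 ** L
--         L += 1
--         t *= 2
--     # pass 2: peel base-4 digits least-significant first, prepending each token
--     parts = []
--     for _ in range(L):
--         m, d = divmod(m, 4)
--         parts = ['0%d' % d] + parts
--     return '/'.join(parts)
-- ===== Notes on version B (the rewrite author's own statement) =====
-- stated objective: alternative
-- what changed: Instead of appending per-level token strings to a list and reversing it, B first folds the quadrant digits into a single base-4 Morton integer while counting levels, then reconstructs the path in a second pass by repeated divmod(m,4), prepending each token.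
import Mathlib
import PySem

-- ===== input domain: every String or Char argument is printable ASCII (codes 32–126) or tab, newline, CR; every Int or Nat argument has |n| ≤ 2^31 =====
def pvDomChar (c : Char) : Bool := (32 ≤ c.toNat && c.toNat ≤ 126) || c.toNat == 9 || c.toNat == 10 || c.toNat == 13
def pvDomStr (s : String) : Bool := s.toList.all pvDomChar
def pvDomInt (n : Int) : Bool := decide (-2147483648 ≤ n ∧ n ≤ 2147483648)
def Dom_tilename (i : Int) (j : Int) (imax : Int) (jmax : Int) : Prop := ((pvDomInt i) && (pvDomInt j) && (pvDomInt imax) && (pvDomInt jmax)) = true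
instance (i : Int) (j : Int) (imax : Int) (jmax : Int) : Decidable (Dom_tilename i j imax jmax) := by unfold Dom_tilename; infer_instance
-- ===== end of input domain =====

-- B differs from A only in how the path string is assembled: one Morton integer
-- plus a base-4 digit-extraction pass, instead of a list of tokens reversed at the end.
-- Both loop ports carry a fuel counter only to make the doubling loop total;
-- fuel = imax.toNat + jmax.toNat never runs out (t doubles from 1, so the guard
-- fails after at most that many rounds), so the guard alone decides the iterations.

-- ===== PORT A =====
-- the while loop: t doubles each round, r collects '0%s' tokens
def tilenameLoopA (i j imax jmax : Int) (fuel : Nat) (t : Int) (r : List String) : List String :=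
  match fuel with
  | 0 => r
  | fuel + 1 =>
    if t < imax ∨ t < jmax then
      let n0 : Int := 0
      let n1 : Int := if PySem.Int.band i t ≠ 0 then n0 + 2 else n0
      let n2 : Int := if PySem.Int.band j t ≠ 0 then n1 + 1 else n1
      tilenameLoopA i j imax jmax fuel (t * 2) (r ++ ["0" ++ PySem.Int.toStr n2])
    else r

def tilename (i : Int) (j : Int) (imax : Int) (jmax : Int) : String :=
  -- r[::-1] is List.reverse; '/'.join is PySem.Str.join
  PySem.Str.join "/" ((tilenameLoopA i j imax jmax (imax.toNat + jmax.toNat) 1 []).reverse)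

-- ===== PORT B =====
-- pass 1: Morton-encode the digits into m (weight 4^L), counting the levels L
def tilenameLoopB1 (i j imax jmax : Int) (fuel : Nat) (t : Int) (L : Nat) (m : Int) : Nat × Int :=
  match fuel with
  | 0 => (L, m)
  | fuel + 1 =>
    if t < imax ∨ t < jmax then
      tilenameLoopB1 i j imax jmax fuel (t * 2) (L + 1)
        (m + ((if PySem.Int.band i t ≠ 0 then (1:Int) else 0) * 2
              + (if PySem.Int.band j t ≠ 0 then (1:Int) else 0)) * 4 ^ L)
    else (L, m)

-- pass 2: peel base-4 digits least-significant first (divmod), prepending each token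
def tilenameLoopB2 : Nat → Int → List String → List String
  | 0, _, parts => parts
  | Nat.succ k, m, parts =>
      tilenameLoopB2 k (PySem.Int.floordiv m 4)
        (("0" ++ PySem.Int.toStr (PySem.Int.mod m 4)) :: parts)

def tilename_alt (i : Int) (j : Int) (imax : Int) (jmax : Int) : String :=
  let Lm := tilenameLoopB1 i j imax jmax (imax.toNat + jmax.toNat) 1 0 0
  PySem.Str.join "/" (tilenameLoopB2 Lm.1 Lm.2 [])

-- ===== PRECONDITION & SPEC =====
def Spec_tilename (i : Int) (j : Int) (imax : Int) (jmax : Int) (out : String) : Prop := out = tilename_alt i j imax jmax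
instance (i : Int) (j : Int) (imax : Int) (jmax : Int) (out : String) : Decidable (Spec_tilename i j imax jmax out) := by unfold Spec_tilename; infer_instance

-- ===== CLAIM (what is proved, stated in full; the proofs are below) =====
def Claim_equal_tilename : Prop := ∀ (i : Int) (j : Int) (imax : Int) (jmax : Int), Dom_tilename i j imax jmax → Spec_tilename i j imax jmax (tilename i j imax jmax)

-- ===== LEMMAS AND PROOFS =====

-- the per-level quadrant digit, and the list of digits the loop visits
def pvDig (i j t : Int) : Int :=
  (if PySem.Int.band i t ≠ 0 then (2:Int) else 0) + (if PySem.Int.band j t ≠ 0 then (1:Int) else 0)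

def pvDigList (i j imax jmax : Int) (fuel : Nat) (t : Int) : List Int :=
  match fuel with
  | 0 => []
  | fuel + 1 =>
    if t < imax ∨ t < jmax then pvDig i j t :: pvDigList i j imax jmax fuel (t * 2)
    else []

def pvTok (d : Int) : String := "0" ++ PySem.Int.toStr d

def pvFromD : List Int → Int
  | [] => 0
  | d :: ds => d + 4 * pvFromD ds

theorem pvLoopA_eq (i j imax jmax : Int) (fuel : Nat) :
    ∀ (t : Int) (r : List String),
      tilenameLoopA i j imax jmax fuel t r = r ++ (pvDigList i j imax jmax fuel t).map pvTok := by
  induction fuel with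
  | zero => intro t r; simp [tilenameLoopA, pvDigList]
  | succ fuel ih =>
      intro t r
      rw [tilenameLoopA, pvDigList]
      by_cases h : t < imax ∨ t < jmax
      · simp only [h, if_true]
        rw [ih]
        simp only [pvDig, pvTok, List.map_cons, List.append_assoc, List.singleton_append]
        split_ifs <;> norm_num
      · simp [h]

theorem pvLoopB1_eq (i j imax jmax : Int) (fuel : Nat) :
    ∀ (t : Int) (L : Nat) (m : Int),
      tilenameLoopB1 i j imax jmax fuel t L m
        = (L + (pvDigList i j imax jmax fuel t).length,
           m + 4 ^ L * pvFromD (pvDigList i j imax jmax fuel t)) := by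
  induction fuel with
  | zero => intro t L m; simp [tilenameLoopB1, pvDigList, pvFromD]
  | succ fuel ih =>
      intro t L m
      rw [tilenameLoopB1, pvDigList]
      by_cases h : t < imax ∨ t < jmax
      · simp only [h, if_true]
        rw [ih]
        simp only [Prod.mk.injEq, pvFromD, pvDig, List.length_cons]
        refine ⟨by omega, ?_⟩
        split_ifs <;> ring
      · simp [h, pvFromD]

theorem pvDigList_bounds (i j imax jmax : Int) (fuel : Nat) :
    ∀ (t : Int), ∀ d ∈ pvDigList i j imax jmax fuel t, 0 ≤ d ∧ d < 4 := by
  induction fuel with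
  | zero => intro t d hd; simp [pvDigList] at hd
  | succ fuel ih =>
      intro t d hd
      rw [pvDigList] at hd
      by_cases h : t < imax ∨ t < jmax
      · simp only [h, if_true] at hd
        rcases List.mem_cons.mp hd with rfl | hd'
        · unfold pvDig; split_ifs <;> norm_num
        · exact ih (t * 2) d hd'
      · simp [h] at hd

theorem pvLoopB2_eq (ds : List Int) (hb : ∀ d ∈ ds, 0 ≤ d ∧ d < 4) (parts : List String) :
    tilenameLoopB2 ds.length (pvFromD ds) parts = (ds.map pvTok).reverse ++ parts := by
  induction ds generalizing parts with
  | nil => simp [tilenameLoopB2]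
  | cons d ds ih =>
      have hd := hb d (List.mem_cons_self ..)
      have hdiv : PySem.Int.floordiv (pvFromD (d :: ds)) 4 = pvFromD ds := by
        rw [PySem.Int.floordiv_eq_ediv_of_pos (by norm_num)]
        show (d + 4 * pvFromD ds) / 4 = pvFromD ds
        omega
      have hmod : PySem.Int.mod (pvFromD (d :: ds)) 4 = d := by
        rw [PySem.Int.mod_eq_emod_of_pos (by norm_num)]
        show (d + 4 * pvFromD ds) % 4 = d
        omega
      rw [List.length_cons, tilenameLoopB2, hdiv, hmod,
        ih (fun x hx => hb x (List.mem_cons_of_mem _ hx))]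
      simp [pvTok]

-- ===== VERDICT (by name: the statement is the Claim_ definition above) =====
theorem tilename_spec : Claim_equal_tilename := by
  intro i j imax jmax _
  unfold Spec_tilename tilename tilename_alt
  rw [pvLoopA_eq, pvLoopB1_eq]
  simp only [pow_zero, one_mul, zero_add]
  rw [pvLoopB2_eq _ (pvDigList_bounds i j imax jmax (imax.toNat + jmax.toNat) 1)]
  simp
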